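-- pv_equiv track=rewrite | github.com/A-stick-bug/DMOJ | Bruce String.py | get_all_choices
-- ===== SOURCE A (Python) =====
-- def get_all_choices(choices):
--     res = [[]]
--     for cur in choices:
--         if len(cur) == 0:
--             return []
--         elif len(cur) == 1:
--             res = [i + [cur[0]] for i in res]
--         else:
--             res = [i + [cur[0]] for i in res] + [i + [cur[1]] for i in res]
--     return res
-- ===== SOURCE B (Python) =====
-- def get_all_choices(choices):
--     if not choices:
--         return [[]]
--     first = choices[0][:2]
--     if not first:
--         return []
--     rest = get_all_choices(choices[1:])
--     return [[x] + r for r in rest for x in first]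
-- ===== Notes on version B (the rewrite author's own statement) =====
-- stated objective: alternative
-- what changed: Replaces A's iterative front-extension of an ever-growing accumulator list with structural recursion over the slots, prepending each of the (at most two) choices of the head slot to every recursively obtained tail combination.
import Mathlib
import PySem

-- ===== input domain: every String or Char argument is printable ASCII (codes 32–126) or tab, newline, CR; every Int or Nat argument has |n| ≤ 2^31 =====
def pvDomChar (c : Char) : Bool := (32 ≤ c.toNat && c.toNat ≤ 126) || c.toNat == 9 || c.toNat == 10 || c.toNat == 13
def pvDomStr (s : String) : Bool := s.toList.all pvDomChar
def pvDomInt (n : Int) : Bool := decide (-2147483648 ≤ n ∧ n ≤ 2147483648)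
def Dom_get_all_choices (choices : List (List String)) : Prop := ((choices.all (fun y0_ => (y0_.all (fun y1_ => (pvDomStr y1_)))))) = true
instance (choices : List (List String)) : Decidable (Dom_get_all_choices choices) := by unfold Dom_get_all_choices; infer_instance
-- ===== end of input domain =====

-- B replaces A's accumulator loop (appending each choice to every prefix built so far)
-- by structural recursion over the slots, prepending head choices to tail combinations;
-- objective: alternative decomposition, same results.

-- ===== PORT A =====
-- loop over `choices` carrying the accumulator `res`, with early return [] on an empty slot
def gacLoop : List (List String) → List (List String) → List (List String)
  | [], res => res
  | cur :: rest, res =>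
    match cur with
    | [] => []                                             -- len(cur) == 0: return []
    | [a] => gacLoop rest (res.map (fun i => i ++ [a]))    -- len(cur) == 1
    | a :: b :: _ =>                                       -- else: uses cur[0] and cur[1]
      gacLoop rest (res.map (fun i => i ++ [a]) ++ res.map (fun i => i ++ [b]))

def get_all_choices (choices : List (List String)) : List (List String) :=
  gacLoop choices [[]]

-- ===== PORT B =====
def get_all_choices_alt : List (List String) → List (List String)
  | [] => [[]]
  | c :: cs =>
    let first := c.take 2                                  -- choices[0][:2]
    if first = [] then []
    else
      let rest := get_all_choices_alt cs
      rest.flatMap (fun r => first.map (fun x => x :: r))  -- [[x]+r for r in rest for x in first]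

-- ===== PRECONDITION & SPEC =====
def Spec_get_all_choices (choices : List (List String)) (out : List (List String)) : Prop := out = get_all_choices_alt choices
instance (choices : List (List String)) (out : List (List String)) : Decidable (Spec_get_all_choices choices out) := by unfold Spec_get_all_choices; infer_instance

-- ===== CLAIM (what is proved, stated in full; the proofs are below) =====
def Claim_equal_get_all_choices : Prop := ∀ (choices : List (List String)), Dom_get_all_choices choices → Spec_get_all_choices choices (get_all_choices choices)

-- ===== LEMMAS AND PROOFS =====

-- loop invariant: A's loop over the remaining slots with accumulator `res` produces,
-- for each tail combination t of B's recursion, each element of res extended by t.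
theorem gacLoop_eq_flatMap (cs : List (List String)) :
    ∀ res : List (List String),
      gacLoop cs res = (get_all_choices_alt cs).flatMap (fun t => res.map (fun i => i ++ t)) := by
  induction cs with
  | nil => intro res; simp [gacLoop, get_all_choices_alt]
  | cons c cs ih =>
    intro res
    match c with
    | [] => simp [gacLoop, get_all_choices_alt]
    | [a] =>
      simp only [gacLoop, ih, get_all_choices_alt]
      simp [List.flatMap_assoc, Function.comp_def, List.append_assoc]
    | a :: b :: rest =>
      simp only [gacLoop, ih, get_all_choices_alt]
      simp [List.flatMap_assoc, List.map_append, Function.comp_def, List.append_assoc]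

-- ===== VERDICT (by name: the statement is the Claim_ definition above) =====
theorem get_all_choices_spec : Claim_equal_get_all_choices := by
  intro choices _
  show get_all_choices choices = get_all_choices_alt choices
  simp [get_all_choices, gacLoop_eq_flatMap]
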